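-- pv_equiv track=rewrite | github.com/garam-park/1zari-be | search/views/tree_views.py | build_region_tree
-- ===== SOURCE A (Python) =====
-- from typing import Dict, List
--
-- def build_region_tree(region_keys) -> Dict[str, Dict[str, List[str]]]:
--     """
--     Redis 키 리스트에서 계층 구조 생성
--     """
--     region_tree: dict = {}
--
--     for key in region_keys:
--         parts = key.split(":")
--         if len(parts) < 4:
--             continue
--
--         city, district, town = parts[1], parts[2], parts[3]
--
--         city_node = region_tree.setdefault(city, {})
--         district_node = city_node.setdefault(district, set())
--         district_node.add(town)
--
--     return {
--         city: {
--             district: sorted(towns) for district, towns in districts.items()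
--         }
--         for city, districts in region_tree.items()
--     }
-- ===== SOURCE B (Python) =====
-- def build_region_tree(region_keys):
--     """Same tree, built declaratively: parse once into (city, district, town)
--     triples, then group by nested order-preserving dedup + filter."""
--     triples = [
--         (p[1], p[2], p[3])
--         for p in (key.split(":") for key in region_keys)
--         if len(p) >= 4
--     ]
--     return {
--         city: {
--             district: sorted({t for d, t in pairs if d == district})
--             for district in dict.fromkeys(d for d, _ in pairs)
--         }
--         for city, pairs in (
--             (c, [(d, t) for cc, d, t in triples if cc == c])
--             for c in dict.fromkeys(c for c, _, _ in triples)
--         )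
--     }
-- ===== Notes on version B (the rewrite author's own statement) =====
-- stated objective: alternative
-- what changed: Replaces the single imperative pass that incrementally mutates nested dicts of sets (setdefault + set.add) with a declarative two-phase build: parse every key once into (city, district, town) triples, then construct the tree by order-preserving dedup (dict.fromkeys) and filtering comprehensions, with sorted(set(...)) per district.
import Mathlib
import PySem

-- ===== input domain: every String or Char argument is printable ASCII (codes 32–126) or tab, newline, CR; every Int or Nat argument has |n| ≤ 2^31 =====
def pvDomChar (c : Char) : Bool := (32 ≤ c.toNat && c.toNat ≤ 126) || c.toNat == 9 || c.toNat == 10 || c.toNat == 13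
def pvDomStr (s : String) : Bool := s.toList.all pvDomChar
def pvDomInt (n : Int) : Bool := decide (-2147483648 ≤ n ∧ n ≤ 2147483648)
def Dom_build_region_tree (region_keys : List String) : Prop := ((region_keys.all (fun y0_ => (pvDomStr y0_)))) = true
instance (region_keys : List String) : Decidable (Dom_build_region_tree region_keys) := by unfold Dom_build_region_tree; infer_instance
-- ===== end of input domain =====

-- B builds the same tree declaratively (parse once into triples, then dedup/filter comprehensions)
-- instead of A's single imperative pass mutating nested dicts of sets; objective: alternative decomposition.

-- ===== PORT A =====
-- key.split(":") is PySem.Str.split? with the literal non-empty separator ":", so .getD [] never fires (exact).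
def build_region_tree (region_keys : List String) : List (String × List (String × List String)) :=
  let region_tree := region_keys.foldl (fun tree key =>
    let parts := (PySem.Str.split? key ":").getD []
    if parts.length < 4 then tree
    else
      let city := (PySem.List.pyGet? parts 1).getD ""
      let district := (PySem.List.pyGet? parts 2).getD ""
      let town := (PySem.List.pyGet? parts 3).getD ""
      let city_node := tree.getD city PySem.Dict.empty
      let district_node := city_node.getD district PySem.Set.empty
      tree.insert city (city_node.insert district (PySem.Set.add district_node town))
    ) PySem.Dict.empty
  region_tree.items.map (fun cd =>
    (cd.1, cd.2.items.map (fun dt => (dt.1, PySem.List.sorted dt.2 (fun x => x) false))))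

-- ===== PORT B =====
-- B's first comprehension: parse every key, keep the parts lists with ≥ 4 fields, take fields 1..3.
def pvTriples (region_keys : List String) : List (String × String × String) :=
  ((region_keys.map (fun key => (PySem.Str.split? key ":").getD [])).filter
      (fun p => 4 ≤ p.length)).map
      (fun p => ((PySem.List.pyGet? p 1).getD "", (PySem.List.pyGet? p 2).getD "", (PySem.List.pyGet? p 3).getD ""))

def build_region_tree_alt (region_keys : List String) : List (String × List (String × List String)) :=
  let triples := pvTriples region_keys
  (PySem.List.dedup (triples.map (fun x => x.1))).map (fun city =>
    let pairs := (triples.filter (fun x => x.1 == city)).map (fun x => x.2)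
    (city,
      (PySem.List.dedup (pairs.map (fun x => x.1))).map (fun district =>
        (district,
          PySem.List.sorted
            (PySem.Set.ofList ((pairs.filter (fun x => x.1 == district)).map (fun x => x.2)))
            (fun x => x) false))))

-- ===== PRECONDITION & SPEC =====
def Spec_build_region_tree (region_keys : List String) (out : List (String × List (String × List String))) : Prop := out = build_region_tree_alt region_keys
instance (region_keys : List String) (out : List (String × List (String × List String))) : Decidable (Spec_build_region_tree region_keys out) := by unfold Spec_build_region_tree; infer_instance

-- ===== CLAIM (what is proved, stated in full; the proofs are below) =====
def Claim_equal_build_region_tree : Prop := ∀ (region_keys : List String), Dom_build_region_tree region_keys → Spec_build_region_tree region_keys (build_region_tree region_keys)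

-- ===== LEMMAS AND PROOFS =====

-- the inner (district-level) update performed by one iteration of A's loop
def pvStepI (nd : PySem.Dict String (PySem.Set String)) (p : String × String) :
    PySem.Dict String (PySem.Set String) :=
  nd.insert p.1 (PySem.Set.add (nd.getD p.1 PySem.Set.empty) p.2)

-- the outer (city-level) update performed by one iteration of A's loop, on an extracted triple
def pvStepT (tree : PySem.Dict String (PySem.Dict String (PySem.Set String)))
    (x : String × String × String) :
    PySem.Dict String (PySem.Dict String (PySem.Set String)) :=
  tree.insert x.1 (pvStepI (tree.getD x.1 PySem.Dict.empty) x.2)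

-- A's fold over the raw keys is the fold of pvStepT over the extracted triples
theorem pvLoopEq (region_keys : List String)
    (tree : PySem.Dict String (PySem.Dict String (PySem.Set String))) :
    region_keys.foldl (fun tree key =>
      let parts := (PySem.Str.split? key ":").getD []
      if parts.length < 4 then tree
      else
        let city := (PySem.List.pyGet? parts 1).getD ""
        let district := (PySem.List.pyGet? parts 2).getD ""
        let town := (PySem.List.pyGet? parts 3).getD ""
        let city_node := tree.getD city PySem.Dict.empty
        let district_node := city_node.getD district PySem.Set.empty
        tree.insert city (city_node.insert district (PySem.Set.add district_node town))) tree
    = (pvTriples region_keys).foldl pvStepT tree := by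
  induction region_keys generalizing tree with
  | nil => rfl
  | cons k rest ih =>
    rw [List.foldl_cons]
    by_cases h : ((PySem.Str.split? k ":").getD []).length < 4
    · have hf : pvTriples (k :: rest) = pvTriples rest := by
        simp [pvTriples, Nat.not_le.mpr h]
      rw [hf, ← ih]
      congr 1
      simp [h]
    · have hf : pvTriples (k :: rest)
          = ((PySem.List.pyGet? ((PySem.Str.split? k ":").getD []) 1).getD "",
             (PySem.List.pyGet? ((PySem.Str.split? k ":").getD []) 2).getD "",
             (PySem.List.pyGet? ((PySem.Str.split? k ":").getD []) 3).getD "")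
            :: pvTriples rest := by
        simp [pvTriples, Nat.le_of_not_lt h]
      rw [hf, List.foldl_cons, ← ih]
      congr 1
      simp [h, pvStepT, pvStepI]

theorem pvGetDInner (ps : List (String × String)) (nd : PySem.Dict String (PySem.Set String))
    (dk : String) :
    (ps.foldl pvStepI nd).getD dk PySem.Set.empty
      = ((ps.filter (fun p => p.1 == dk)).map (fun p => p.2)).foldl PySem.Set.add
          (nd.getD dk PySem.Set.empty) := by
  induction ps generalizing nd with
  | nil => rfl
  | cons p rest ih =>
    by_cases h : p.1 = dk
    · subst h
      simp only [List.foldl_cons, List.filter_cons, beq_self_eq_true, if_pos, List.map_cons]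
      rw [ih]
      simp [pvStepI, PySem.Dict.getD_insert_self]
    · have hb : (p.1 == dk) = false := beq_false_of_ne h
      simp only [List.foldl_cons, List.filter_cons, hb, Bool.false_eq_true]
      rw [ih]
      simp [pvStepI, PySem.Dict.getD_insert, Ne.symm h]

theorem pvGetDCity (ts : List (String × String × String))
    (d : PySem.Dict String (PySem.Dict String (PySem.Set String))) (c : String) :
    (ts.foldl pvStepT d).getD c PySem.Dict.empty
      = ((ts.filter (fun x => x.1 == c)).map (fun x => x.2)).foldl pvStepI
          (d.getD c PySem.Dict.empty) := by
  induction ts generalizing d with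
  | nil => rfl
  | cons x rest ih =>
    by_cases h : x.1 = c
    · subst h
      simp only [List.foldl_cons, List.filter_cons, beq_self_eq_true, if_pos, List.map_cons]
      rw [ih]
      simp [pvStepT, PySem.Dict.getD_insert_self]
    · have hb : (x.1 == c) = false := beq_false_of_ne h
      simp only [List.foldl_cons, List.filter_cons, hb, Bool.false_eq_true]
      rw [ih]
      simp [pvStepT, PySem.Dict.getD_insert, Ne.symm h]

-- the inner fold from the empty dict, rendered as B's grouped construction
theorem pvInnerItems (ps : List (String × String)) :
    (ps.foldl pvStepI PySem.Dict.empty).items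
      = (PySem.Set.ofList (ps.map (fun p => p.1))).map (fun dk =>
          (dk, PySem.Set.ofList ((ps.filter (fun p => p.1 == dk)).map (fun p => p.2)))) := by
  have hnd : (ps.foldl pvStepI PySem.Dict.empty).keys.Nodup :=
    PySem.Dict.nodup_keys_foldl_insert_key ps (fun p => p.1)
      (fun nd p => PySem.Set.add (nd.getD p.1 PySem.Set.empty) p.2) PySem.Dict.empty
      PySem.Dict.nodup_keys_empty
  have hkeys : (ps.foldl pvStepI PySem.Dict.empty).keys
      = PySem.Set.ofList (ps.map (fun p => p.1)) := by
    have := PySem.Dict.keys_foldl_insert_key ps (fun p => p.1)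
      (fun nd p => PySem.Set.add (nd.getD p.1 PySem.Set.empty) p.2)
      (PySem.Dict.empty : PySem.Dict String (PySem.Set String))
    simpa [PySem.Dict.keys_empty, PySem.Set.update_nil_left] using this
  rw [PySem.Dict.items_eq_map_keys _ hnd PySem.Set.empty, hkeys]
  refine List.map_congr_left (fun dk _ => ?_)
  rw [pvGetDInner, PySem.Dict.getD_empty, PySem.Set.ofList_eq_foldl]
  rfl

theorem pvOuterItems (ts : List (String × String × String)) :
    (ts.foldl pvStepT PySem.Dict.empty).items
      = (PySem.Set.ofList (ts.map (fun x => x.1))).map (fun c =>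
          (c, ((ts.filter (fun x => x.1 == c)).map (fun x => x.2)).foldl pvStepI
                PySem.Dict.empty)) := by
  have hnd : (ts.foldl pvStepT PySem.Dict.empty).keys.Nodup :=
    PySem.Dict.nodup_keys_foldl_insert_key ts (fun x => x.1)
      (fun tree x => pvStepI (tree.getD x.1 PySem.Dict.empty) x.2) PySem.Dict.empty
      PySem.Dict.nodup_keys_empty
  have hkeys : (ts.foldl pvStepT PySem.Dict.empty).keys
      = PySem.Set.ofList (ts.map (fun x => x.1)) := by
    have := PySem.Dict.keys_foldl_insert_key ts (fun x => x.1)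
      (fun tree x => pvStepI (tree.getD x.1 PySem.Dict.empty) x.2)
      (PySem.Dict.empty : PySem.Dict String (PySem.Dict String (PySem.Set String)))
    simpa [PySem.Dict.keys_empty, PySem.Set.update_nil_left] using this
  rw [PySem.Dict.items_eq_map_keys _ hnd PySem.Dict.empty, hkeys]
  refine List.map_congr_left (fun c _ => ?_)
  rw [pvGetDCity, PySem.Dict.getD_empty]

-- ===== VERDICT (by name: the statement is the Claim_ definition above) =====
theorem build_region_tree_spec : Claim_equal_build_region_tree := by
  intro region_keys _
  unfold Spec_build_region_tree build_region_tree build_region_tree_alt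
  simp only [pvLoopEq, pvOuterItems, List.map_map, PySem.List.dedup_eq_ofList]
  refine List.map_congr_left (fun c _ => ?_)
  simp only [Function.comp_def]
  rw [pvInnerItems, List.map_map]
  simp [Function.comp_def, List.map_map]
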